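-- pv_equiv track=rewrite | github.com/btabram/advent-of-code | 2015/19/day19.py | getOneReplacementPossibilities
-- ===== SOURCE A (Python) =====
-- def getOneReplacementPossibilities(mol: str, resp: list[tuple[str, str]]) -> set[str]:
--     new_distinct_molecules = set()
--     for lhs, rhs in resp:
--         i = 0
--         while i < len(mol):
--             match_index = mol.find(lhs, i)
--             if match_index == -1:
--                 break
--
--             new_molecule = mol[:match_index] + rhs + mol[match_index + len(lhs) :]
--             new_distinct_molecules.add(new_molecule)
--
--             i = match_index + len(lhs)
--     return new_distinct_molecules
-- ===== SOURCE B (Python) =====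
-- def getOneReplacementPossibilities(mol: str, resp: list[tuple[str, str]]) -> set[str]:
--     new_distinct_molecules = set()
--     for lhs, rhs in resp:
--         parts = mol.split(lhs)
--         for j in range(len(parts) - 1):
--             new_molecule = lhs.join(parts[: j + 1]) + rhs + lhs.join(parts[j + 1 :])
--             new_distinct_molecules.add(new_molecule)
--     return new_distinct_molecules
-- ===== Notes on version B (the rewrite author's own statement) =====
-- stated objective: idiomatic
-- what changed: Replaces A's manual find/slice scan (an index-advancing while loop per rule) by computing parts = mol.split(lhs) once per rule and rebuilding each candidate molecule as lhs.join(parts[:j+1]) + rhs + lhs.join(parts[j+1:]); str.split visits exactly the same non-overlapping match positions.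
-- outside the precondition, e.g. on getOneReplacementPossibilities('', [('', 'x')]): A returns set(), B raises ValueError
import Mathlib
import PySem

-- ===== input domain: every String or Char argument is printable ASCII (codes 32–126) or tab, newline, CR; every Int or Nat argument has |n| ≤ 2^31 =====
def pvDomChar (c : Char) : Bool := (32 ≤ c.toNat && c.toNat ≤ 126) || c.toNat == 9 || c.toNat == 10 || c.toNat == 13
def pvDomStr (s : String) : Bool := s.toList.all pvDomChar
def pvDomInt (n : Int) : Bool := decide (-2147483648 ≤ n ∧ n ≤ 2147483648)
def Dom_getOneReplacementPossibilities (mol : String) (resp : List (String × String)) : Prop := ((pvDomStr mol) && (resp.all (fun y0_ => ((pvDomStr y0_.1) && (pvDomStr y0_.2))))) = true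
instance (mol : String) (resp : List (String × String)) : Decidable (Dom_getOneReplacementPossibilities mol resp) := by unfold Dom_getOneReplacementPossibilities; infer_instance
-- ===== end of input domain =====

-- B replaces A's find/slice index-advancing scan by split-then-rejoin per rule (idiomatic decomposition,
-- same cost); both programs only read their arguments, and the equivalence is about the returned set.

-- ===== PORT A =====
-- the inner 'while i < len(mol)' loop of A; Python terminates within mol.length + 1 iterations
-- whenever lhs ≠ "" (each step moves i past a match), which Pre_ guarantees; fuel only makes it total.
def pvAWhile (mol lhs rhs : List Char) (fuel : Nat) (i : Int) (acc : PySem.Set (List Char)) : PySem.Set (List Char) :=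
  match fuel with
  | 0 => acc
  | fuel + 1 =>
    if i < (mol.length : Int) then
      let m := PySem.Chars.findFrom mol lhs i none
      if m = -1 then acc
      else
        pvAWhile mol lhs rhs fuel (m + (lhs.length : Int))
          (PySem.Set.add acc
            (PySem.Chars.slice mol none (some m) ++ rhs ++
             PySem.Chars.slice mol (some (m + (lhs.length : Int))) none))
    else acc

def getOneReplacementPossibilities (mol : String) (resp : List (String × String)) : List String :=
  (resp.foldl
    (fun acc p => pvAWhile mol.toList p.1.toList p.2.toList (mol.toList.length + 1) 0 acc)
    PySem.Set.empty).map String.ofList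

-- ===== PORT B =====
-- the body of B for one rule (lhs, rhs): parts = mol.split(lhs); for j in range(len(parts)-1): add rejoin
def pvBRule (mol lhs rhs : List Char) (acc : PySem.Set (List Char)) : PySem.Set (List Char) :=
  let parts := PySem.Chars.splitOn mol lhs
  (List.range (parts.length - 1)).foldl
    (fun (acc : PySem.Set (List Char)) (j : Nat) =>
      PySem.Set.add acc
        (PySem.Chars.join lhs (PySem.List.slice parts none (some ((j : Int) + 1))) ++ rhs ++
         PySem.Chars.join lhs (PySem.List.slice parts (some ((j : Int) + 1)) none)))
    acc

def getOneReplacementPossibilities_alt (mol : String) (resp : List (String × String)) : List String :=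
  (resp.foldl (fun acc p => pvBRule mol.toList p.1.toList p.2.toList acc)
    PySem.Set.empty).map String.ofList

-- ===== PRECONDITION & SPEC =====
-- Pre_ excludes replacement pairs with empty lhs: there Python A infinite-loops for nonempty mol
-- (and in the corner mol = "" returns the empty set) while B's str.split raises ValueError.
def Pre_getOneReplacementPossibilities (mol : String) (resp : List (String × String)) : Prop :=
  ∀ p ∈ resp, p.1 ≠ ""
instance (mol : String) (resp : List (String × String)) : Decidable (Pre_getOneReplacementPossibilities mol resp) := by unfold Pre_getOneReplacementPossibilities; infer_instance

def pvWitness_getOneReplacementPossibilities : String × (List (String × String)) :=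
  ("HOH", [("H", "HO"), ("O", "HH")])

def Spec_getOneReplacementPossibilities (mol : String) (resp : List (String × String)) (out : List String) : Prop := out = getOneReplacementPossibilities_alt mol resp
instance (mol : String) (resp : List (String × String)) (out : List String) : Decidable (Spec_getOneReplacementPossibilities mol resp out) := by unfold Spec_getOneReplacementPossibilities; infer_instance

-- ===== CLAIM (what is proved, stated in full; the proofs are below) =====
def Claim_equal_getOneReplacementPossibilities : Prop := ∀ (mol : String) (resp : List (String × String)), Dom_getOneReplacementPossibilities mol resp → Pre_getOneReplacementPossibilities mol resp → Spec_getOneReplacementPossibilities mol resp (getOneReplacementPossibilities mol resp)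

-- ===== LEMMAS AND PROOFS =====

-- a clean recursive form of Python's split on the (nonempty) separator c :: lt
def pvSplits (c : Char) (lt : List Char) : List Char → List (List Char)
  | [] => [[]]
  | a :: rest =>
    if (c :: lt).isPrefixOf (a :: rest) then
      [] :: pvSplits c lt ((a :: rest).drop (lt.length + 1))
    else
      (pvSplits c lt rest).modifyHead (a :: ·)
  termination_by l => l.length
  decreasing_by
    · simp [List.length_drop]
    · simp

-- the sequence of molecules one rule emits, walking the split parts with the consumed prefix in front
def pvEmit (sep rhs : List Char) : List Char → List (List Char) → List (List Char)
  | _, [] => []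
  | _, [_] => []
  | pre, p :: parts => (pre ++ p ++ rhs ++ PySem.Chars.join sep parts) :: pvEmit sep rhs (pre ++ p ++ sep) parts

theorem pvSplits_ne_nil (c : Char) (lt l : List Char) : pvSplits c lt l ≠ [] := by
  fun_induction pvSplits c lt l with
  | case1 => simp
  | case2 => simp
  | case3 _ _ _ ih => cases h : pvSplits c lt _ <;> simp_all

theorem pvSplits_no_occ (c : Char) (lt l : List Char) (h : ¬ (c :: lt) <:+: l) :
    pvSplits c lt l = [l] := by
  fun_induction pvSplits c lt l with
  | case1 => rfl
  | case2 a rest hp ih =>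
    exact absurd ((List.isPrefixOf_iff_prefix.mp hp).isInfix) h
  | case3 a rest hp ih =>
    rw [ih (fun hi => h (hi.trans (List.suffix_cons a rest).isInfix))]
    rfl

theorem pvSplits_first_occ (c : Char) (lt : List Char) (l : List Char) (k : Nat)
    (h1 : (c :: lt) <+: l.drop k) (h2 : ∀ i < k, ¬ (c :: lt) <+: l.drop i) :
    pvSplits c lt l = l.take k :: pvSplits c lt (l.drop (k + (lt.length + 1))) := by
  induction l generalizing k with
  | nil => simp at h1
  | cons a rest ih =>
    cases k with
    | zero =>
      rw [pvSplits, if_pos (List.isPrefixOf_iff_prefix.mpr (by simpa using h1))]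
      simp
    | succ k =>
      rw [pvSplits,
        if_neg (fun hp => h2 0 (by omega) (by simpa using List.isPrefixOf_iff_prefix.mp hp)),
        ih k (by simpa using h1) (fun i hi => by simpa using h2 (i+1) (by omega))]
      rw [show k + 1 + (lt.length + 1) = (k + (lt.length + 1)) + 1 from by omega,
        List.drop_succ_cons]
      simp [List.modifyHead]

theorem pvSplits_join (c : Char) (lt l : List Char) :
    PySem.Chars.join (c :: lt) (pvSplits c lt l) = l := by
  fun_induction pvSplits c lt l with
  | case1 => simp [PySem.Chars.join_singleton]
  | case2 a rest hp ih =>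
    obtain ⟨t, ht⟩ := List.isPrefixOf_iff_prefix.mp hp
    cases hsp : pvSplits c lt ((a :: rest).drop (lt.length + 1)) with
    | nil => exact absurd hsp (pvSplits_ne_nil c lt _)
    | cons p ps =>
      rw [hsp] at ih
      rw [PySem.Chars.join_cons_cons, ih]
      have hdrop : (a :: rest).drop (lt.length + 1) = t := by rw [← ht]; simp
      rw [hdrop, ← ht]
      simp
  | case3 a rest hp ih =>
    cases hsp : pvSplits c lt rest with
    | nil => exact absurd hsp (pvSplits_ne_nil c lt _)
    | cons p ps =>
      rw [hsp] at ih
      cases ps with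
      | nil =>
        rw [PySem.Chars.join_singleton] at ih
        simp [List.modifyHead, PySem.Chars.join_singleton, ih]
      | cons q ps' =>
        rw [PySem.Chars.join_cons_cons] at ih
        simp only [List.modifyHead, PySem.Chars.join_cons_cons]
        rw [← ih]
        simp

theorem pvGo_eq (c : Char) (lt : List Char) : ∀ (fuel : Nat) (l cur : List Char) (acc : List (List Char)),
    l.length < fuel →
    PySem.Chars.splitOn.go (c :: lt) fuel l cur acc =
      acc.reverse ++ (pvSplits c lt l).modifyHead (cur.reverse ++ ·) := by
  intro fuel
  induction fuel with
  | zero => omega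
  | succ fuel ih =>
    intro l cur acc hl
    cases l with
    | nil =>
      rw [PySem.Chars.splitOn.go]
      · simp [pvSplits, List.modifyHead]
      · omega
    | cons a rest =>
      rw [PySem.Chars.splitOn.go]
      by_cases hp : (c :: lt).isPrefixOf (a :: rest)
      · rw [if_pos hp]
        rw [ih _ _ _ (by simp at hl ⊢; omega)]
        rw [pvSplits, if_pos hp]
        simp [List.modifyHead]
        cases h : pvSplits c lt (List.drop lt.length rest) <;> simp
      · rw [if_neg hp]
        rw [ih _ _ _ (by simp at hl ⊢; omega)]
        rw [pvSplits, if_neg hp]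
        cases h : pvSplits c lt rest with
        | nil => simp [List.modifyHead]
        | cons p ps => simp [List.modifyHead]

theorem pvSplitOn_eq (c : Char) (lt l : List Char) :
    PySem.Chars.splitOn l (c :: lt) = pvSplits c lt l := by
  rw [PySem.Chars.splitOn, pvGo_eq c lt (l.length + 1) l [] [] (by omega)]
  cases h : pvSplits c lt l <;> simp [List.modifyHead]

theorem pvEmit_range (sep rhs : List Char) : ∀ (parts : List (List Char)) (pre : List Char),
    pvEmit sep rhs pre parts =
      (List.range (parts.length - 1)).map
        (fun j => pre ++ (PySem.Chars.join sep (parts.take (j + 1)) ++ (rhs ++ PySem.Chars.join sep (parts.drop (j + 1))))) := by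
  intro parts
  induction parts with
  | nil => intro pre; rfl
  | cons p parts ih =>
    intro pre
    cases parts with
    | nil => rfl
    | cons q ps =>
      rw [pvEmit, ih]
      simp only [List.length_cons, Nat.add_sub_cancel]
      rw [List.range_succ_eq_map]
      simp only [List.map_cons, List.map_map]
      congr 1
      · simp [PySem.Chars.join_singleton, List.append_assoc]
      · apply List.map_congr_left
        intro j hj
        simp only [Function.comp_apply, List.take_succ_cons, List.drop_succ_cons,
          PySem.Chars.join_cons_cons]
        simp [List.append_assoc]
      simp

theorem pvTake_prefix (mol sep : List Char) (m : Nat) (h : sep <+: mol.drop m) :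
    mol.take (m + sep.length) = mol.take m ++ sep := by
  obtain ⟨t, ht⟩ := h
  rw [List.take_add, ← ht]
  simp [List.take_left']

theorem pvAWhile_eq (mol rhs : List Char) (c : Char) (lt : List Char) :
    ∀ (fuel k : Nat) (acc : PySem.Set (List Char)), k ≤ mol.length → mol.length - k < fuel →
    pvAWhile mol (c :: lt) rhs fuel (k : Int) acc =
      List.foldl PySem.Set.add acc (pvEmit (c :: lt) rhs (mol.take k) (pvSplits c lt (mol.drop k))) := by
  intro fuel
  induction fuel with
  | zero => omega
  | succ fuel ih =>
    intro k acc hk hfuel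
    rw [pvAWhile]
    by_cases hlt : (k : Int) < (mol.length : Int)
    · rw [if_pos hlt]
      simp only
      rw [PySem.Chars.findFrom_natCast mol (c :: lt) k hk]
      by_cases hf : PySem.Chars.find (mol.drop k) (c :: lt) = -1
      · rw [if_pos (by rw [hf]; rfl)]
        rw [pvSplits_no_occ c lt _ ((PySem.Chars.find_eq_neg_one_iff _ _).mp hf)]
        rfl
      · have h0 : 0 ≤ PySem.Chars.find (mol.drop k) (c :: lt) := by
          have := PySem.Chars.neg_one_le_find (s := mol.drop k) (sub := c :: lt)
          omega
        obtain ⟨hocc, hmin⟩ := PySem.Chars.find_spec h0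
        set n := PySem.Chars.find (mol.drop k) (c :: lt) with hn
        set j : Nat := n.toNat with hj
        have hjn : n = ((j : Nat) : Int) := by omega
        have hocc' : (c :: lt) <+: (mol.drop k).drop j := hocc
        have hoccm : (c :: lt) <+: mol.drop (k + j) := by rwa [List.drop_drop] at hocc'
        have hlen : k + j + (lt.length + 1) ≤ mol.length := by
          have := hoccm.length_le
          simp [List.length_drop, List.length_cons] at this
          omega
        rw [if_neg (by rw [if_neg hf]; omega)]
        rw [if_neg hf]
        have e1 : (k : Int) + n = ((k + j : Nat) : Int) := by push_cast; omega
        rw [e1]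
        have e2 : ((k + j : Nat) : Int) + (((c :: lt).length : Nat) : Int)
            = ((k + j + (lt.length + 1) : Nat) : Int) := by
          push_cast [List.length_cons]; omega
        rw [e2, PySem.Chars.slice_eq_listSlice, PySem.Chars.slice_eq_listSlice,
          PySem.List.slice_to_natCast, PySem.List.slice_from_natCast]
        rw [pvSplits_first_occ c lt (mol.drop k) j hocc' hmin]
        rcases hq : pvSplits c lt ((mol.drop k).drop (j + (lt.length + 1))) with _ | ⟨q, qs⟩
        · exact absurd hq (pvSplits_ne_nil c lt _)
        · have hqs : pvSplits c lt (mol.drop (k + j + (lt.length + 1))) = q :: qs := by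
            rw [← hq, List.drop_drop]
            have hassoc : k + (j + (lt.length + 1)) = k + j + (lt.length + 1) := by omega
            rw [hassoc]
          have hjoin : PySem.Chars.join (c :: lt) (q :: qs)
              = mol.drop (k + j + (lt.length + 1)) := by
            rw [← hqs, pvSplits_join]
          have hpre : mol.take k ++ (mol.drop k).take j = mol.take (k + j) :=
            (List.take_add ..).symm
          have hpre' : mol.take (k + j) ++ (c :: lt) = mol.take (k + j + (lt.length + 1)) := by
            have := pvTake_prefix mol (c :: lt) (k + j) hoccm
            simpa [List.length_cons, Nat.add_assoc] using this.symm
          rw [pvEmit, List.foldl_cons]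
          · rw [ih (k + j + (lt.length + 1)) _ hlen (by omega), hqs]
            congr 2
            · rw [hjoin, hpre]
            · rw [hpre, hpre']
          · simp
    · rw [if_neg hlt]
      have : k = mol.length := by omega
      subst this
      simp [pvSplits, pvEmit]

theorem pvBRule_eq (mol rhs : List Char) (c : Char) (lt : List Char) (acc : PySem.Set (List Char)) :
    pvBRule mol (c :: lt) rhs acc =
      List.foldl PySem.Set.add acc (pvEmit (c :: lt) rhs [] (pvSplits c lt mol)) := by
  simp only [pvBRule, pvSplitOn_eq]
  rw [pvEmit_range, List.foldl_map]
  apply PySem.List.foldl_congr_mem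
  intro a x hx
  have h1 : (x : Int) + 1 = ((x + 1 : Nat) : Int) := by push_cast; ring
  rw [h1, PySem.List.slice_to_natCast, PySem.List.slice_from_natCast]
  simp [List.append_assoc]

theorem pvRule_agree (mol lhs rhs : List Char) (h : lhs ≠ []) (acc : PySem.Set (List Char)) :
    pvAWhile mol lhs rhs (mol.length + 1) 0 acc = pvBRule mol lhs rhs acc := by
  cases lhs with
  | nil => exact absurd rfl h
  | cons c lt =>
    have h0 : (0 : Int) = ((0 : Nat) : Int) := by norm_num
    rw [h0, pvAWhile_eq mol rhs c lt (mol.length + 1) 0 acc (by omega) (by omega)]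
    rw [pvBRule_eq]
    simp

theorem pvFoldl_agree (mol : List Char) (rs : List (String × String))
    (h : ∀ p ∈ rs, p.1 ≠ "") (acc : PySem.Set (List Char)) :
    rs.foldl (fun acc p => pvAWhile mol p.1.toList p.2.toList (mol.length + 1) 0 acc) acc =
      rs.foldl (fun acc p => pvBRule mol p.1.toList p.2.toList acc) acc := by
  induction rs generalizing acc with
  | nil => rfl
  | cons p rs ih =>
    rw [List.foldl_cons, List.foldl_cons,
      pvRule_agree mol p.1.toList p.2.toList
        (fun hl => h p (by simp) (String.toList_inj.mp (by simp [hl]))) acc]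
    exact ih (fun q hq => h q (by simp [hq])) _

-- ===== VERDICT (by name: the statement is the Claim_ definition above) =====
theorem getOneReplacementPossibilities_spec : Claim_equal_getOneReplacementPossibilities := by
  intro mol resp _ hpre
  unfold Spec_getOneReplacementPossibilities getOneReplacementPossibilities getOneReplacementPossibilities_alt
  rw [pvFoldl_agree mol.toList resp hpre]
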